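-- pv_equiv track=rewrite | github.com/ianwhale/nsga-net | macro_search_space/evolution/check_duplicates.py | check_node_IO
-- ===== SOURCE A (Python) =====
-- def count_node_IO(genome):
--     node_IO = dict()
--     keys = []
--     # first node:
--     key = '0-{}'.format(sum(x[0] for x in genome[:-1]))
--     keys.append(key)
--     for i in range(1, len(genome)-1):
--         key = '{}-{}'.format(sum(genome[i-1]), sum(x[i] for x in genome[:-1] if len(x) > i))
--         keys.append(key)
--     # last node
--     key = '{}-0'.format(sum(genome[-2]))
--     keys.append(key)
--     unique_keys = list(set(keys))
--     for k in unique_keys: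
--         node_IO[k] = sum(k == key for key in keys)
--
--     return node_IO
--
-- def check_node_IO(genome1, genome2):
--     equivalent = False
--     node_IO1 = count_node_IO(genome1)
--     node_IO2 = count_node_IO(genome2)
--     if node_IO1.keys() == node_IO2.keys():
--         for key in node_IO1:
--             if node_IO1[key] != node_IO2[key]:
--                 break
--         equivalent = True
--     return equivalent
-- ===== SOURCE B (Python) =====
-- def _key_set(genome):
--     # Column sums of all rows but the last, accumulated in one pass
--     # (replaces A's per-key generator scans over genome[:-1]).
--     col = {}
--     for row in genome[:-1]:
--         for j, v in enumerate(row):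
--             col[j] = col.get(j, 0) + v
--     rowsums = [sum(row) for row in genome]
--     keys = {'0-{}'.format(col.get(0, 0))}
--     for i in range(1, len(genome) - 1):
--         keys.add('{}-{}'.format(rowsums[i - 1], col.get(i, 0)))
--     keys.add('{}-0'.format(rowsums[-2]))
--     return keys
--
--
-- def check_node_IO(genome1, genome2):
--     # A returns True iff the two key SETS coincide (its per-key count loop
--     # only breaks and never changes the result), so compare the sets directly.
--     return _key_set(genome1) == _key_set(genome2)
-- ===== Notes on version B (the rewrite author's own statement) =====
-- stated objective: alternative
-- what changed: B accumulates column sums of genome[:-1] in one dict pass and a row-sum list, builds each node's key from those tables, and returns set(keys1)==set(keys2) directly, eliminating A's per-key generator scans, its frequency dict, the unique-key counting loop and its dead per-key comparison loop (whose break never changes the result).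
import Mathlib
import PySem

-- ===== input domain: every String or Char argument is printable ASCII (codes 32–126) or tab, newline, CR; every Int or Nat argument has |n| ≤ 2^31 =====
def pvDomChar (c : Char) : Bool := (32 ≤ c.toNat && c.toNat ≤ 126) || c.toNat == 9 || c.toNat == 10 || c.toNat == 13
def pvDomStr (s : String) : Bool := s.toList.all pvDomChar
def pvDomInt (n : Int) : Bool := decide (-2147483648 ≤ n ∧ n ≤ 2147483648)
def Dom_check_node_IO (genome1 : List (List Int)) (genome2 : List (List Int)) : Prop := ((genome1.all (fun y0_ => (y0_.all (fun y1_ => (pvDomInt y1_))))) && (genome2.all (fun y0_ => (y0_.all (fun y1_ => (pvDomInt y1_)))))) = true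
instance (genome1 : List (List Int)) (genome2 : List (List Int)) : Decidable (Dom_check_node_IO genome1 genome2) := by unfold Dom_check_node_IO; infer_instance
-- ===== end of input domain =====

-- B replaces A's per-key generator scans, frequency dict and dead comparison loop by one
-- column-sum table + row-sum list and a direct set-equality test (objective: simpler).


-- ===== PORT A =====
-- count_node_IO: builds the key list, then a dict key -> multiplicity over the
-- distinct keys.  x[0] / genome[i-1] / genome[-2] are ported with pyGetD; the
-- default value is never used on inputs satisfying Pre_ (where Python returns).
def count_node_IO (genome : List (List Int)) : PySem.Dict String Int :=
  -- first node: '0-{}'.format(sum(x[0] for x in genome[:-1]))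
  let keys : List String :=
    ["0-" ++ PySem.Int.toStr
        (((PySem.List.slice genome none (some (-1))).map
            (fun x => PySem.List.pyGetD x 0 0)).sum)]
  -- for i in range(1, len(genome)-1): '{}-{}'.format(...)
  let keys :=
    (PySem.List.pyRange 1 ((genome.length : Int) - 1) 1).foldl
      (fun ks i =>
        ks ++ [PySem.Int.toStr (PySem.List.pyGetD genome (i - 1) []).sum
               ++ "-" ++
               PySem.Int.toStr
                 (((PySem.List.slice genome none (some (-1))).filter
                     (fun x => decide (i < (x.length : Int)))).map
                   (fun x => PySem.List.pyGetD x i 0)).sum]) keys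
  -- last node: '{}-0'.format(sum(genome[-2]))
  let keys := keys ++ [PySem.Int.toStr (PySem.List.pyGetD genome (-2) []).sum ++ "-0"]
  let unique_keys : PySem.Set String := PySem.Set.ofList keys
  unique_keys.foldl
    (fun d k => d.insert k ((keys.map (fun key => if k == key then (1 : Int) else 0)).sum))
    PySem.Dict.empty

def check_node_IO (genome1 : List (List Int)) (genome2 : List (List Int)) : Bool :=
  let equivalent := false
  let node_IO1 := count_node_IO genome1
  let node_IO2 := count_node_IO genome2
  -- Python's dict.keys() == compares as sets.  The per-key loop in A only
  -- `break`s and never changes `equivalent`, so inside the branch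
  -- `equivalent = True` unconditionally.
  if PySem.Set.equal node_IO1.keys node_IO2.keys then true else equivalent

-- ===== PORT B =====
-- _key_set: one pass over genome[:-1] accumulating column sums in a dict,
-- a row-sum list, then the key set built directly.
def key_set_alt (genome : List (List Int)) : PySem.Set String :=
  let col : PySem.Dict Int Int :=
    (PySem.List.slice genome none (some (-1))).foldl
      (fun d row =>
        (PySem.List.enumerate row 0).foldl
          (fun d jv => d.insert jv.1 (d.getD jv.1 0 + jv.2)) d)
      PySem.Dict.empty
  let rowsums : List Int := genome.map List.sum
  let keys : PySem.Set String :=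
    PySem.Set.ofList ["0-" ++ PySem.Int.toStr (col.getD 0 0)]
  let keys :=
    (PySem.List.pyRange 1 ((genome.length : Int) - 1) 1).foldl
      (fun s i => s.add (PySem.Int.toStr (PySem.List.pyGetD rowsums (i - 1) 0)
                         ++ "-" ++ PySem.Int.toStr (col.getD i 0))) keys
  keys.add (PySem.Int.toStr (PySem.List.pyGetD rowsums (-2) 0) ++ "-0")

def check_node_IO_alt (genome1 : List (List Int)) (genome2 : List (List Int)) : Bool :=
  PySem.Set.equal (key_set_alt genome1) (key_set_alt genome2)

-- ===== PRECONDITION & SPEC =====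
-- Pre_ excludes exactly the inputs where Python A raises IndexError: a genome
-- shorter than 2 (genome[-2]) or an empty row before the last (x[0]).
def Pre_check_node_IO (genome1 : List (List Int)) (genome2 : List (List Int)) : Prop :=
  2 ≤ genome1.length ∧ (∀ x ∈ genome1.dropLast, x ≠ []) ∧
  2 ≤ genome2.length ∧ (∀ x ∈ genome2.dropLast, x ≠ [])
instance (genome1 : List (List Int)) (genome2 : List (List Int)) : Decidable (Pre_check_node_IO genome1 genome2) := by unfold Pre_check_node_IO; infer_instance

def pvWitness_check_node_IO : List (List Int) × List (List Int) := ([[1], [2, 3]], [[1, 2], [3]])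

def Spec_check_node_IO (genome1 : List (List Int)) (genome2 : List (List Int)) (out : Bool) : Prop := out = check_node_IO_alt genome1 genome2
instance (genome1 : List (List Int)) (genome2 : List (List Int)) (out : Bool) : Decidable (Spec_check_node_IO genome1 genome2 out) := by unfold Spec_check_node_IO; infer_instance

-- ===== CLAIM (what is proved, stated in full; the proofs are below) =====
def Claim_equal_check_node_IO : Prop := ∀ (genome1 : List (List Int)) (genome2 : List (List Int)), Dom_check_node_IO genome1 genome2 → Pre_check_node_IO genome1 genome2 → Spec_check_node_IO genome1 genome2 (check_node_IO genome1 genome2)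
-- ===== LEMMAS AND PROOFS =====

-- abbreviations for the two fold steps of B's column table
def colStep (d : PySem.Dict Int Int) (jv : Int × Int) : PySem.Dict Int Int :=
  d.insert jv.1 (d.getD jv.1 0 + jv.2)

-- keys below the enumeration start are never touched
theorem colStep_lt (row : List Int) (s i : Int) (h : i < s) (d : PySem.Dict Int Int) :
    ((PySem.List.enumerate row s).foldl colStep d).getD i 0 = d.getD i 0 := by
  induction row generalizing s d with
  | nil => simp [PySem.List.enumerate_nil]
  | cons x rest ih =>
      rw [PySem.List.enumerate_cons]
      simp only [List.foldl_cons]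
      rw [ih (s + 1) (by omega)]
      simp only [colStep]
      rw [PySem.Dict.getD_insert]
      simp [show ¬ i = s by omega]

-- folding one enumerated row adds row.getD k 0 at key s + k
theorem colStep_row (row : List Int) (s : Int) (k : Nat) (d : PySem.Dict Int Int) :
    ((PySem.List.enumerate row s).foldl colStep d).getD (s + k) 0
      = d.getD (s + k) 0 + row.getD k 0 := by
  induction row generalizing s k d with
  | nil => simp [PySem.List.enumerate_nil]
  | cons x rest ih =>
      rw [PySem.List.enumerate_cons]
      simp only [List.foldl_cons]
      cases k with
      | zero =>
          rw [colStep_lt _ (s + 1) _ (by omega)]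
          simp only [colStep]
          rw [PySem.Dict.getD_insert]
          simp
      | succ k =>
          have : s + ((k : Int) + 1) = (s + 1) + (k : Int) := by ring
          push_cast
          rw [this, ih (s + 1) k]
          simp only [colStep]
          rw [PySem.Dict.getD_insert]
          simp [show ¬ (s + 1) + (k : Int) = s by omega]

-- the whole column table: entry k is the sum of the k-th entries of all rows
theorem col_getD (rows : List (List Int)) (k : Nat) (d : PySem.Dict Int Int) :
    ((rows.foldl (fun d row => (PySem.List.enumerate row 0).foldl colStep d) d).getD (k : Int) 0)
      = d.getD (k : Int) 0 + (rows.map (fun row => row.getD k 0)).sum := by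
  induction rows generalizing d with
  | nil => simp
  | cons row rest ih =>
      simp only [List.foldl_cons, List.map_cons, List.sum_cons]
      rw [ih, show ((k : Nat) : Int) = 0 + (k : Nat) by ring, colStep_row row 0 k d]
      ring_nf

-- A's filtered column sum equals the getD column sum (any k)
theorem filtered_sum (rows : List (List Int)) (k : Nat) :
    ((rows.filter (fun x => decide ((k : Int) < (x.length : Int)))).map
        (fun x => PySem.List.pyGetD x (k : Int) 0)).sum
      = (rows.map (fun row => row.getD k 0)).sum := by
  induction rows with
  | nil => simp
  | cons x rest ih =>
      by_cases h : (k : Int) < (x.length : Int)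
      · have hk : k < x.length := by exact_mod_cast h
        simp only [List.filter_cons, List.map_cons, List.sum_cons]
        rw [if_pos (by simpa using h)]
        simp only [List.map_cons, List.sum_cons]
        rw [ih, PySem.List.pyGetD_natCast, List.getD_eq_getElem?_getD,
          List.getElem?_eq_getElem hk]
      · have hk : x.length ≤ k := by omega
        simp only [List.filter_cons]
        rw [if_neg (by simpa using h)]
        simp only [List.map_cons, List.sum_cons]
        rw [ih, List.getD_eq_getElem?_getD, List.getElem?_eq_none (by omega)]
        simp

-- A's unguarded first-column sum equals the guarded one when no row is empty
theorem first_sum (rows : List (List Int)) (hne : ∀ x ∈ rows, x ≠ []) :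
    (rows.map (fun x => PySem.List.pyGetD x 0 0)).sum
      = (rows.map (fun row => row.getD 0 0)).sum := by
  induction rows with
  | nil => simp
  | cons x rest ih =>
      have hx : x ≠ [] := hne x (by simp)
      have hlen : 0 < x.length := List.length_pos_iff.mpr hx
      simp only [List.map_cons, List.sum_cons]
      rw [ih (fun y hy => hne y (by simp [hy]))]
      have : PySem.List.pyGetD x (0 : Int) 0 = x.getD 0 0 := by
        rw [show (0 : Int) = ((0 : Nat) : Int) by norm_num, PySem.List.pyGetD_natCast]
      rw [this]

-- row sums: indexing the mapped list is summing the indexed row (any index)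
theorem rowsum_getD (genome : List (List Int)) (i : Int) :
    PySem.List.pyGetD (genome.map List.sum) i 0 = (PySem.List.pyGetD genome i []).sum := by
  have := PySem.List.pyGetD_map List.sum genome i ([] : List Int)
  simpa using this

-- A's key list (built by appending in a fold) as a plain concatenation
theorem keys_A_eq (genome : List (List Int)) :
    ((PySem.List.pyRange 1 ((genome.length : Int) - 1) 1).foldl
      (fun ks i =>
        ks ++ [PySem.Int.toStr (PySem.List.pyGetD genome (i - 1) []).sum
               ++ "-" ++
               PySem.Int.toStr
                 (((PySem.List.slice genome none (some (-1))).filter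
                     (fun x => decide (i < (x.length : Int)))).map
                   (fun x => PySem.List.pyGetD x i 0)).sum])
      ["0-" ++ PySem.Int.toStr
          (((PySem.List.slice genome none (some (-1))).map
              (fun x => PySem.List.pyGetD x 0 0)).sum)])
    = ["0-" ++ PySem.Int.toStr
          (((PySem.List.slice genome none (some (-1))).map
              (fun x => PySem.List.pyGetD x 0 0)).sum)]
      ++ (PySem.List.pyRange 1 ((genome.length : Int) - 1) 1).map
          (fun i =>
            PySem.Int.toStr (PySem.List.pyGetD genome (i - 1) []).sum
            ++ "-" ++
            PySem.Int.toStr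
              (((PySem.List.slice genome none (some (-1))).filter
                  (fun x => decide (i < (x.length : Int)))).map
                (fun x => PySem.List.pyGetD x i 0)).sum) := by
  rw [PySem.List.foldl_append_singleton_eq_map]

-- under Pre_, B's key set is exactly set(A's key list)
theorem key_set_alt_eq (genome : List (List Int))
    (hne : ∀ x ∈ genome.dropLast, x ≠ []) :
    key_set_alt genome
      = PySem.Set.ofList
          (["0-" ++ PySem.Int.toStr
              (((PySem.List.slice genome none (some (-1))).map
                  (fun x => PySem.List.pyGetD x 0 0)).sum)]
            ++ (PySem.List.pyRange 1 ((genome.length : Int) - 1) 1).map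
                (fun i =>
                  PySem.Int.toStr (PySem.List.pyGetD genome (i - 1) []).sum
                  ++ "-" ++
                  PySem.Int.toStr
                    (((PySem.List.slice genome none (some (-1))).filter
                        (fun x => decide (i < (x.length : Int)))).map
                      (fun x => PySem.List.pyGetD x i 0)).sum)
            ++ [PySem.Int.toStr (PySem.List.pyGetD genome (-2) []).sum ++ "-0"]) := by
  have colEq : ∀ k : Nat,
      ((genome.dropLast.foldl
          (fun d row => (PySem.List.enumerate row 0).foldl
            (fun d jv => d.insert jv.1 (d.getD jv.1 0 + jv.2)) d)
          PySem.Dict.empty).getD (k : Int) 0)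
        = (genome.dropLast.map (fun row => row.getD k 0)).sum := by
    intro k
    have := col_getD genome.dropLast k PySem.Dict.empty
    simpa [colStep] using this
  -- the three key pieces agree
  have hfirst :
      ("0-" ++ PySem.Int.toStr
        ((genome.dropLast.foldl
            (fun d row => (PySem.List.enumerate row 0).foldl
              (fun d jv => d.insert jv.1 (d.getD jv.1 0 + jv.2)) d)
            PySem.Dict.empty).getD 0 0) : String)
      = "0-" ++ PySem.Int.toStr
          ((genome.dropLast.map (fun x => PySem.List.pyGetD x 0 0)).sum) := by
    have h0 := colEq 0
    rw [show ((0 : Nat) : Int) = (0 : Int) by norm_num] at h0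
    rw [h0, first_sum genome.dropLast hne]
  have hmid : ∀ i ∈ PySem.List.pyRange 1 ((genome.length : Int) - 1) 1,
      (PySem.Int.toStr (PySem.List.pyGetD (genome.map List.sum) (i - 1) 0)
        ++ "-" ++ PySem.Int.toStr
          ((genome.dropLast.foldl
              (fun d row => (PySem.List.enumerate row 0).foldl
                (fun d jv => d.insert jv.1 (d.getD jv.1 0 + jv.2)) d)
              PySem.Dict.empty).getD i 0) : String)
      = PySem.Int.toStr (PySem.List.pyGetD genome (i - 1) []).sum
        ++ "-" ++
        PySem.Int.toStr
          ((genome.dropLast.filter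
              (fun x => decide (i < (x.length : Int)))).map
            (fun x => PySem.List.pyGetD x i 0)).sum := by
    intro i hi
    have h1i : 1 ≤ i := (PySem.List.mem_pyRange_one.mp hi).1
    have hik : i = ((i.toNat : Nat) : Int) := by omega
    rw [rowsum_getD]
    congr 1
    rw [hik, colEq i.toNat, ← filtered_sum genome.dropLast i.toNat]
  have hlast :
      (PySem.Int.toStr (PySem.List.pyGetD (genome.map List.sum) (-2) 0) ++ "-0" : String)
      = PySem.Int.toStr (PySem.List.pyGetD genome (-2) []).sum ++ "-0" := by
    rw [rowsum_getD]
  simp only [key_set_alt, PySem.List.slice_to_neg_one]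
  rw [← PySem.Set.update_map_eq_foldl_add]
  rw [hfirst, hlast, List.map_congr_left hmid]
  simp only [PySem.Set.ofList_append, PySem.Set.update_cons, PySem.Set.update_nil]

-- A's dict has exactly the distinct keys of the key list, in first-occurrence order.
theorem keys_count_node_IO (genome : List (List Int)) :
    (count_node_IO genome).keys
      = PySem.Set.ofList
          (["0-" ++ PySem.Int.toStr
              (((PySem.List.slice genome none (some (-1))).map
                  (fun x => PySem.List.pyGetD x 0 0)).sum)]
            ++ (PySem.List.pyRange 1 ((genome.length : Int) - 1) 1).map
                (fun i =>
                  PySem.Int.toStr (PySem.List.pyGetD genome (i - 1) []).sum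
                  ++ "-" ++
                  PySem.Int.toStr
                    (((PySem.List.slice genome none (some (-1))).filter
                        (fun x => decide (i < (x.length : Int)))).map
                      (fun x => PySem.List.pyGetD x i 0)).sum)
            ++ [PySem.Int.toStr (PySem.List.pyGetD genome (-2) []).sum ++ "-0"]) := by
  unfold count_node_IO
  rw [PySem.Dict.keys_foldl_insert]
  simp only [PySem.Dict.keys_empty]
  rw [keys_A_eq]
  rw [PySem.Set.update_nil_left, PySem.Set.ofList_ofList]

-- ===== VERDICT (by name: the statement is the Claim_ definition above) =====
theorem check_node_IO_spec : Claim_equal_check_node_IO := by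
  intro g1 g2 _ hpre
  obtain ⟨h1, hne1, h2, hne2⟩ := hpre
  unfold Spec_check_node_IO
  simp only [check_node_IO, check_node_IO_alt,
    keys_count_node_IO, key_set_alt_eq g1 hne1, key_set_alt_eq g2 hne2]
  split
  · next h => exact h.symm
  · next h => exact (Bool.of_not_eq_true h).symm
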